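-- pv_equiv track=rewrite | github.com/mobs-lab/epymodelingsuite-cloud | src/epycloud/lib/gcs.py | extract_scan_prefix
-- ===== SOURCE A (Python) =====
-- def extract_scan_prefix(patterns: list[str]) -> str:
--     """Extract the common literal directory prefix from patterns.
--
--     For each pattern, finds the longest path component that contains no
--     wildcard characters. Returns the shortest such prefix across all
--     patterns so the scan covers all of them.
--
--     Examples
--     --------
--     >>> extract_scan_prefix(["202605/*"])
--     '202605'
--     >>> extract_scan_prefix(["test/reff_resimm_beta"])
--     'test/reff_resimm_beta'
--     >>> extract_scan_prefix(["test/myexp/*", "test/myexp"])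
--     'test/myexp'
--     >>> extract_scan_prefix(["*"])
--     ''
--     """
--     if not patterns:
--         return ""
--
--     prefixes: list[str] = []
--     for p in patterns:
--         # Find position of first wildcard character
--         wildcard_pos = len(p)
--         for i, ch in enumerate(p):
--             if ch in ("*", "?", "["):
--                 wildcard_pos = i
--                 break
--
--         literal = p[:wildcard_pos]
--
--         if wildcard_pos < len(p):
--             # Has wildcards: truncate to last / to get a directory boundary
--             slash_pos = literal.rfind("/")
--             prefixes.append(literal[:slash_pos] if slash_pos >= 0 else "")
--         else:
--             # No wildcards: entire string is the prefix
--             prefixes.append(literal)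
--
--     # Return shortest prefix (covers all patterns)
--     return min(prefixes, key=len)
-- ===== SOURCE B (Python) =====
-- def extract_scan_prefix(patterns: list[str]) -> str:
--     """Single state-machine pass per pattern committing each completed
--     '/'-component while wildcard-free, plus a running minimum over the
--     patterns instead of building a prefix list and calling min()."""
--     if not patterns:
--         return ""
--
--     def literal_dir(p: str) -> str:
--         committed = None  # directory prefix committed at the last '/' seen
--         pending = []      # chars of the current, not-yet-committed component
--         for ch in p:
--             if ch in "*?[":
--                 return committed if committed is not None else ""
--             if ch == "/":
--                 seg = "".join(pending)
--                 committed = seg if committed is None else committed + "/" + seg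
--                 pending = []
--             else:
--                 pending.append(ch)
--         return p  # no wildcard: the whole pattern is literal
--
--     best = literal_dir(patterns[0])
--     for p in patterns[1:]:
--         cur = literal_dir(p)
--         if len(cur) < len(best):
--             best = cur
--     return best
-- ===== Notes on version B (the rewrite author's own statement) =====
-- stated objective: alternative
-- what changed: B replaces A's first-wildcard character scan followed by rfind-last-slash and slicing with a single state-machine pass per pattern that commits each completed '/'-component while wildcard-free, and replaces building the prefix list plus min(key=len) with a running minimum over the patterns.
import Mathlib
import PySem

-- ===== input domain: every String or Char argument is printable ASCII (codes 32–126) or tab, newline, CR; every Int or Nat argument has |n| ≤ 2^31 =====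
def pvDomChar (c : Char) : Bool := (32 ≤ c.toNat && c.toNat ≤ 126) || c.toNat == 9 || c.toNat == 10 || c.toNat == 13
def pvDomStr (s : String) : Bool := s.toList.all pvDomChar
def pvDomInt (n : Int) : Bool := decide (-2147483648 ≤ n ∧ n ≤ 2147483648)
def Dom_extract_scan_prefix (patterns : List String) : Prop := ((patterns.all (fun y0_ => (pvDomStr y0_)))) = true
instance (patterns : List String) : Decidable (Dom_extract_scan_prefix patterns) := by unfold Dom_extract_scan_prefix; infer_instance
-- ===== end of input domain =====

-- B replaces A's first-wildcard scan + rfind-last-slash + slice + min(key=len) by a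
-- state-machine pass per pattern committing completed literal components, with a
-- running minimum over the patterns (alternative decomposition, same cost).

-- ===== PORT A =====
-- per-pattern body of A's main loop: first-wildcard scan, slice, rfind, slice
def pvPrefA (p : String) : String :=
  let l := p.toList
  -- 'for i, ch in enumerate(p): if ch in ("*","?","["): wildcard_pos = i; break' (init len(p))
  let wildcardPos := l.findIdx (fun ch => ch = '*' || ch = '?' || ch = '[')
  let literal := l.take wildcardPos          -- p[:wildcard_pos], index ≥ 0
  if wildcardPos < l.length then
    let slashPos := PySem.Chars.rfind literal ['/']    -- literal.rfind("/")
    if 0 ≤ slashPos then String.ofList (literal.take slashPos.toNat) else ""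
  else String.ofList literal

def extract_scan_prefix (patterns : List String) : String :=
  if patterns = [] then ""
  else
    let prefixes := patterns.map pvPrefA
    match PySem.List.min? prefixes PySem.Str.len with   -- min(prefixes, key=len)
    | some m => m
    | none => ""   -- unreachable: prefixes is nonempty here

-- ===== PORT B =====
-- state machine of Source B's literal_dir: committed = prefix committed at the last '/',
-- pending = chars of the current component; 'none' result = loop fell through (no wildcard)
def pvWalkB : List Char → Option (List Char) → List Char → Option (List Char)
  | [], _committed, _pending => none
  | c :: r, committed, pending =>
    if c = '*' || c = '?' || c = '[' then some (committed.getD [])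
    else if c = '/' then
      pvWalkB r (some (match committed with
                       | none => pending
                       | some cm => cm ++ '/' :: pending)) []
    else pvWalkB r committed (pending ++ [c])

def pvLiteralDir (p : String) : String :=
  match pvWalkB p.toList none [] with
  | some l => String.ofList l
  | none => p            -- no wildcard: the whole pattern is literal

def extract_scan_prefix_alt (patterns : List String) : String :=
  match patterns with
  | [] => ""
  | p :: ps =>
    -- running minimum: 'if len(cur) < len(best): best = cur'
    ps.foldl (fun best q =>
      let cur := pvLiteralDir q
      if PySem.Str.len cur < PySem.Str.len best then cur else best) (pvLiteralDir p)

-- ===== PRECONDITION & SPEC =====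
def Spec_extract_scan_prefix (patterns : List String) (out : String) : Prop := out = extract_scan_prefix_alt patterns
instance (patterns : List String) (out : String) : Decidable (Spec_extract_scan_prefix patterns out) := by unfold Spec_extract_scan_prefix; infer_instance

-- ===== CLAIM (what is proved, stated in full; the proofs are below) =====
def Claim_equal_extract_scan_prefix : Prop := ∀ (patterns : List String), Dom_extract_scan_prefix patterns → Spec_extract_scan_prefix patterns (extract_scan_prefix patterns)

-- ===== LEMMAS AND PROOFS =====

def pvWild (c : Char) : Bool := c = '*' || c = '?' || c = '['

-- glue of Source B: committed stays, or committed + "/" + x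
def pvGlue : Option (List Char) → List Char → List Char
  | none, x => x
  | some cm, x => cm ++ '/' :: x

-- ---- rfind '/' : cons-step characterisation (spec of A's rfind) ----

theorem pvRfindGoCons (j : Nat) (c : Char) (r : List Char) :
    PySem.Chars.rfind.go (c :: r) ['/'] (j + 1) =
      if 0 ≤ PySem.Chars.rfind.go r ['/'] j then PySem.Chars.rfind.go r ['/'] j + 1
      else (if c = '/' then 0 else -1) := by
  induction j with
  | zero =>
      cases r with
      | nil =>
          have hd : List.drop (0 + 1) [c] = ([] : List Char) := by simp
          rw [PySem.Chars.rfind.go.eq_2, PySem.Chars.rfind.go.eq_1, PySem.Chars.rfind.go.eq_1, hd]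
          by_cases hc : c = '/'
          · subst hc; simp [List.isPrefixOf]
          · have hc' : ¬ ('/' = c) := fun h => hc h.symm
            simp [List.isPrefixOf, hc, hc']
      | cons a t =>
          have hd : List.drop (0 + 1) (c :: a :: t) = a :: t := by simp
          rw [PySem.Chars.rfind.go.eq_2, PySem.Chars.rfind.go.eq_1, PySem.Chars.rfind.go.eq_1, hd]
          by_cases ha : a = '/' <;> by_cases hc : c = '/'
          · subst ha; subst hc; simp [List.isPrefixOf]
          · subst ha
            simp [List.isPrefixOf]
          · subst hc
            have ha' : ¬ ('/' = a) := fun h => ha h.symm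
            simp [List.isPrefixOf, ha']
          · have hc' : ¬ ('/' = c) := fun h => hc h.symm
            have ha' : ¬ ('/' = a) := fun h => ha h.symm
            simp [List.isPrefixOf, ha', hc', hc]
  | succ j ih =>
      rw [PySem.Chars.rfind.go.eq_2 (c :: r) ['/'] (j + 1), ih,
          PySem.Chars.rfind.go.eq_2 r ['/'] j]
      have hd : List.drop (j + 1 + 1) (c :: r) = List.drop (j + 1) r := by simp
      rw [hd]
      split_ifs <;> first | rfl | (push_cast; omega)

theorem pvRfindCons (c : Char) (r : List Char) :
    PySem.Chars.rfind (c :: r) ['/'] =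
      if 0 ≤ PySem.Chars.rfind r ['/'] then PySem.Chars.rfind r ['/'] + 1
      else (if c = '/' then 0 else -1) := by
  show PySem.Chars.rfind.go (c :: r) ['/'] (r.length + 1) = _
  exact pvRfindGoCons r.length c r

theorem pvRfindNil : PySem.Chars.rfind [] ['/'] = -1 := by decide

theorem pvRfindNonneg (l : List Char) : 0 ≤ PySem.Chars.rfind l ['/'] ↔ '/' ∈ l := by
  induction l with
  | nil => simp [pvRfindNil]
  | cons c r ih =>
      rw [pvRfindCons]
      by_cases h : 0 ≤ PySem.Chars.rfind r ['/']
      · simp [h, ih.mp h]; omega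
      · have hr : '/' ∉ r := fun hm => h (ih.mpr hm)
        by_cases hc : c = '/'
        · simp [h, hc]
        · have hc' : ¬ ('/' = c) := fun e => hc e.symm
          simp [h, hc, hc', hr]

-- ---- B's state machine computes A's last-slash cut ----

theorem pvWalkBSpec (l : List Char) : ∀ (cm : Option (List Char)) (pd : List Char),
    pvWalkB l cm pd =
      if l.any pvWild then
        some (let lit := l.takeWhile (fun c => !pvWild c)
              if '/' ∈ lit then
                pvGlue cm (pd ++ lit.take (PySem.Chars.rfind lit ['/']).toNat)
              else cm.getD [])
      else none := by
  induction l with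
  | nil => intro cm pd; simp [pvWalkB]
  | cons c r ih =>
      intro cm pd
      by_cases hc : pvWild c
      · have hw : (c :: r).any pvWild = true := by simp [hc]
        have hlit : (c :: r).takeWhile (fun x => !pvWild x) = [] :=
          List.takeWhile_cons_of_neg (by simp [hc])
        rw [pvWalkB.eq_def]
        simp only [show (c = '*' || c = '?' || c = '[') = true from hc, if_pos, hw, if_pos,
          hlit]
        simp
      · have hlit : (c :: r).takeWhile (fun x => !pvWild x)
            = c :: r.takeWhile (fun x => !pvWild x) :=
          List.takeWhile_cons_of_pos (by simp [hc])
        have hany : (c :: r).any pvWild = r.any pvWild := by simp [hc]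
        rw [pvWalkB.eq_def]
        simp only [show (c = '*' || c = '?' || c = '[') = false from by simpa [pvWild] using hc,
          Bool.false_eq_true, if_false]
        by_cases hsl : c = '/'
        · subst hsl
          rw [if_pos rfl, ih]
          by_cases hr : r.any pvWild
          · simp only [hr, if_true, hany, hlit]
            set litr := r.takeWhile (fun x => !pvWild x) with hlitr
            have hmem : '/' ∈ '/' :: litr := List.mem_cons_self
            rw [if_pos hmem]
            by_cases hs : '/' ∈ litr
            · have h0 : 0 ≤ PySem.Chars.rfind litr ['/'] := (pvRfindNonneg _).mpr hs
              have hrf : PySem.Chars.rfind ('/' :: litr) ['/']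
                  = PySem.Chars.rfind litr ['/'] + 1 := by rw [pvRfindCons, if_pos h0]
              have htn : (PySem.Chars.rfind litr ['/'] + 1).toNat
                  = (PySem.Chars.rfind litr ['/']).toNat + 1 := by omega
              rw [if_pos hs, hrf, htn, List.take_succ_cons]
              cases cm <;> simp [pvGlue]
            · have h0 : ¬ 0 ≤ PySem.Chars.rfind litr ['/'] := by
                rw [pvRfindNonneg]; exact hs
              have hrf : PySem.Chars.rfind ('/' :: litr) ['/'] = 0 := by
                rw [pvRfindCons, if_neg h0, if_pos rfl]
              rw [if_neg hs, hrf]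
              cases cm <;> simp [pvGlue]
          · simp only [hr, Bool.false_eq_true, if_false, hany]
        · rw [if_neg hsl, ih]
          by_cases hr : r.any pvWild
          · simp only [hr, if_true, hany, hlit]
            set litr := r.takeWhile (fun x => !pvWild x) with hlitr
            have hmemiff : ('/' ∈ c :: litr) ↔ '/' ∈ litr := by
              constructor
              · intro h
                rcases List.mem_cons.mp h with h | h
                · exact absurd h.symm hsl
                · exact h
              · exact fun h => List.mem_cons_of_mem _ h
            by_cases hs : '/' ∈ litr
            · have h0 : 0 ≤ PySem.Chars.rfind litr ['/'] := (pvRfindNonneg _).mpr hs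
              have hrf : PySem.Chars.rfind (c :: litr) ['/']
                  = PySem.Chars.rfind litr ['/'] + 1 := by rw [pvRfindCons, if_pos h0]
              have htn : (PySem.Chars.rfind litr ['/'] + 1).toNat
                  = (PySem.Chars.rfind litr ['/']).toNat + 1 := by omega
              rw [if_pos hs, if_pos (hmemiff.mpr hs), hrf, htn, List.take_succ_cons]
              cases cm <;> simp [pvGlue]
            · rw [if_neg hs, if_neg (fun h => hs (hmemiff.mp h))]
          · simp only [hr, Bool.false_eq_true, if_false, hany]

theorem pvPrefEq (p : String) : pvPrefA p = pvLiteralDir p := by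
  rw [pvPrefA, pvLiteralDir, pvWalkBSpec]
  have hl : (fun ch : Char => ch = '*' || ch = '?' || ch = '[') = pvWild := rfl
  rw [hl]
  set l := p.toList with hlp
  by_cases hw : l.any pvWild
  · have hlt : l.findIdx pvWild < l.length := by
      rw [List.findIdx_lt_length]; simpa using hw
    have htake : l.take (l.findIdx pvWild) = l.takeWhile (fun x => !pvWild x) := by
      have := @List.takeWhile_eq_take_findIdx_not Char l (fun x => !pvWild x)
      simpa using this.symm
    simp only [hw, if_pos, hlt, if_pos, htake]
    set lit := l.takeWhile (fun x => !pvWild x) with hlit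
    by_cases hs : '/' ∈ lit
    · rw [if_pos ((pvRfindNonneg _).mpr hs), if_pos hs]
      simp [pvGlue]
    · rw [if_neg (by rw [pvRfindNonneg]; exact hs), if_neg hs]
      simp
  · have hlen : l.findIdx pvWild = l.length := by
      rw [List.findIdx_eq_length]
      intro x hx
      have := List.any_eq_false.mp (by simpa using hw) x hx
      simpa using this
    simp only [hw, Bool.false_eq_true, if_false, hlen, lt_irrefl, if_false, List.take_length]
    exact String.ofList_toList

-- ---- min(key=len) as a running minimum ----

-- the step of PySem.List.min? with key = len, as a named function
def pvF (acc : Option String) (x : String) : Option String :=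
  match acc with
  | none => some x
  | some m => if PySem.Str.len x < PySem.Str.len m then some x else some m

theorem pvMinUnfold (xs : List String) :
    PySem.List.min? xs PySem.Str.len = List.foldl pvF none xs := by
  rw [PySem.List.min?]
  congr 1
  funext acc x
  cases acc <;> rfl

theorem pvMinFold (ps : List String) : ∀ (b : String),
    List.foldl pvF (some b) (ps.map pvLiteralDir)
    = some (ps.foldl (fun best q =>
        let cur := pvLiteralDir q
        if PySem.Str.len cur < PySem.Str.len best then cur else best) b) := by
  induction ps with
  | nil => intro b; rfl
  | cons p ps ih =>
      intro b
      simp only [List.map_cons, List.foldl_cons, pvF]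
      by_cases h : PySem.Str.len (pvLiteralDir p) < PySem.Str.len b
      · rw [if_pos h, if_pos h, ih]
      · rw [if_neg h, if_neg h, ih]

-- ===== VERDICT (by name: the statement is the Claim_ definition above) =====
theorem extract_scan_prefix_spec : Claim_equal_extract_scan_prefix := by
  intro patterns _
  unfold Spec_extract_scan_prefix extract_scan_prefix extract_scan_prefix_alt
  cases patterns with
  | nil => rfl
  | cons p ps =>
      simp only [reduceCtorEq, if_false]
      have hmap : (p :: ps).map pvPrefA = (p :: ps).map pvLiteralDir :=
        List.map_congr_left (fun q _ => pvPrefEq q)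
      rw [hmap]
      rw [pvMinUnfold, List.map_cons, List.foldl_cons,
          show pvF none (pvLiteralDir p) = some (pvLiteralDir p) from rfl, pvMinFold]
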